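-- pv_equiv track=rewrite | github.com/SEOYUNJE/Endoscope-Object-Detection | utils/string_decoder.py | string_decoder
-- ===== SOURCE A (Python) =====
-- def string_decoder(predict_string):
--     s = predict_string.split(' ')
--     class_id = [x for x in (s[0::6])]
--     score = [x for x in (s[1::6])]
--     x_min = [x for x in (s[2::6])]
--     y_min = [x for x in (s[3::6])]
--     x_max = [x for x in (s[4::6])]
--     y_max = [x for x in (s[5::6])]
--
--     return class_id, score, x_min, y_min, x_max, y_max
-- ===== SOURCE B (Python) =====
-- def string_decoder(predict_string):
--     # Single pass: deal the tokens round-robin into the six fields.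
--     fields = ([], [], [], [], [], [])
--     for i, tok in enumerate(predict_string.split(' ')):
--         fields[i % 6].append(tok)
--     return fields
-- ===== Notes on version B (the rewrite author's own statement) =====
-- stated objective: alternative
-- what changed: Replaces six separate strided-slice traversals (s[k::6] for k=0..5) by one enumerate pass that deals each token round-robin into fields[i % 6].
import Mathlib
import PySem

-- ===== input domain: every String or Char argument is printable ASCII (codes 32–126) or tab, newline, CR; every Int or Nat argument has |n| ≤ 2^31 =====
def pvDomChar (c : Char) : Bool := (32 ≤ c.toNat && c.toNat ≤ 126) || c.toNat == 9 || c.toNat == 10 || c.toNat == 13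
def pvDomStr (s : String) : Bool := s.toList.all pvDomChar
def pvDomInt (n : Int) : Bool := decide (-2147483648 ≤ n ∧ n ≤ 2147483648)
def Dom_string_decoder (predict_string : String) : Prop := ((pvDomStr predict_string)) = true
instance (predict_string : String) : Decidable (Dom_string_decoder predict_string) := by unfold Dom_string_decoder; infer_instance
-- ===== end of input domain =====

-- B replaces six strided slices by one enumerate pass dealing tokens round-robin into fields[i % 6] (objective: alternative).

-- ===== PORT A =====
-- hand port of the strided slice s[k::6] (nonnegative start k, step 6, as in A's code):
-- Python takes elements at indices k, k+6, k+12, … while in range, i.e. every 6th element of s.drop k.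
def pvEvery6 {α : Type} : List α → List α
  | [] => []
  | x :: rest => x :: pvEvery6 (rest.drop 5)
termination_by l => l.length
decreasing_by simp

def string_decoder (predict_string : String) : List String × List String × List String × List String × List String × List String :=
  let s := (PySem.Str.split? predict_string " ").getD []   -- sep ≠ "", so split? is always some
  let class_id := (pvEvery6 (s.drop 0)).map (fun x => x)   -- [x for x in s[0::6]]
  let score    := (pvEvery6 (s.drop 1)).map (fun x => x)
  let x_min    := (pvEvery6 (s.drop 2)).map (fun x => x)
  let y_min    := (pvEvery6 (s.drop 3)).map (fun x => x)
  let x_max    := (pvEvery6 (s.drop 4)).map (fun x => x)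
  let y_max    := (pvEvery6 (s.drop 5)).map (fun x => x)
  (class_id, score, x_min, y_min, x_max, y_max)

-- ===== PORT B =====
-- fields[i % 6].append(tok): the tuple-index dispatch ported as an if-chain on i % 6
def pvStep : List String × List String × List String × List String × List String × List String → Int × String → List String × List String × List String × List String × List String × List String
  | (a, b, c, d, e, f), (i, x) =>
    if i % 6 = 0 then (a ++ [x], b, c, d, e, f)
    else if i % 6 = 1 then (a, b ++ [x], c, d, e, f)
    else if i % 6 = 2 then (a, b, c ++ [x], d, e, f)
    else if i % 6 = 3 then (a, b, c, d ++ [x], e, f)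
    else if i % 6 = 4 then (a, b, c, d, e ++ [x], f)
    else (a, b, c, d, e, f ++ [x])

def string_decoder_alt (predict_string : String) : List String × List String × List String × List String × List String × List String :=
  let toks := (PySem.Str.split? predict_string " ").getD []
  (PySem.List.enumerate toks).foldl pvStep ([], [], [], [], [], [])

-- ===== PRECONDITION & SPEC =====
def Spec_string_decoder (predict_string : String) (out : List String × List String × List String × List String × List String × List String) : Prop := out = string_decoder_alt predict_string
instance (predict_string : String) (out : List String × List String × List String × List String × List String × List String) : Decidable (Spec_string_decoder predict_string out) := by unfold Spec_string_decoder; infer_instance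

-- ===== CLAIM (what is proved, stated in full; the proofs are below) =====
def Claim_equal_string_decoder : Prop := ∀ (predict_string : String), Dom_string_decoder predict_string → Spec_string_decoder predict_string (string_decoder predict_string)

-- ===== LEMMAS AND PROOFS =====
lemma foldl_step_eq (toks : List String) : ∀ (i : Int), 0 ≤ i →
    ∀ (a b c d e f : List String),
    (PySem.List.enumerate toks i).foldl pvStep (a, b, c, d, e, f) =
      (a ++ pvEvery6 (toks.drop (((0 - i) % 6).toNat)),
       b ++ pvEvery6 (toks.drop (((1 - i) % 6).toNat)),
       c ++ pvEvery6 (toks.drop (((2 - i) % 6).toNat)),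
       d ++ pvEvery6 (toks.drop (((3 - i) % 6).toNat)),
       e ++ pvEvery6 (toks.drop (((4 - i) % 6).toNat)),
       f ++ pvEvery6 (toks.drop (((5 - i) % 6).toNat))) := by
  induction toks with
  | nil => intro i hi a b c d e f; simp [PySem.List.enumerate, pvEvery6]
  | cons x rest ih =>
    intro i hi a b c d e f
    have hcases : i % 6 = 0 ∨ i % 6 = 1 ∨ i % 6 = 2 ∨ i % 6 = 3 ∨ i % 6 = 4 ∨ i % 6 = 5 := by omega
    rcases hcases with hm | hm | hm | hm | hm | hm
    · -- i % 6 = 0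
      have h0 : (((0:Int) - i) % 6).toNat = 0 := by omega
      have h1 : (((1:Int) - i) % 6).toNat = (((1:Int) - (i+1)) % 6).toNat + 1 := by omega
      have h2 : (((2:Int) - i) % 6).toNat = (((2:Int) - (i+1)) % 6).toNat + 1 := by omega
      have h3 : (((3:Int) - i) % 6).toNat = (((3:Int) - (i+1)) % 6).toNat + 1 := by omega
      have h4 : (((4:Int) - i) % 6).toNat = (((4:Int) - (i+1)) % 6).toNat + 1 := by omega
      have h5 : (((5:Int) - i) % 6).toNat = (((5:Int) - (i+1)) % 6).toNat + 1 := by omega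
      simp only [PySem.List.enumerate_cons, List.foldl_cons, pvStep, hm, h0, h1, h2, h3, h4, h5]
      norm_num
      rw [ih (i+1) (by omega)]
      simp [pvEvery6]
      all_goals congr 2
      all_goals omega
    · -- i % 6 = 1
      have h0 : (((0:Int) - i) % 6).toNat = (((0:Int) - (i+1)) % 6).toNat + 1 := by omega
      have h1 : (((1:Int) - i) % 6).toNat = 0 := by omega
      have h2 : (((2:Int) - i) % 6).toNat = (((2:Int) - (i+1)) % 6).toNat + 1 := by omega
      have h3 : (((3:Int) - i) % 6).toNat = (((3:Int) - (i+1)) % 6).toNat + 1 := by omega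
      have h4 : (((4:Int) - i) % 6).toNat = (((4:Int) - (i+1)) % 6).toNat + 1 := by omega
      have h5 : (((5:Int) - i) % 6).toNat = (((5:Int) - (i+1)) % 6).toNat + 1 := by omega
      simp only [PySem.List.enumerate_cons, List.foldl_cons, pvStep, hm, h0, h1, h2, h3, h4, h5]
      norm_num
      rw [ih (i+1) (by omega)]
      simp [pvEvery6]
      all_goals congr 2
      all_goals omega
    · -- i % 6 = 2
      have h0 : (((0:Int) - i) % 6).toNat = (((0:Int) - (i+1)) % 6).toNat + 1 := by omega
      have h1 : (((1:Int) - i) % 6).toNat = (((1:Int) - (i+1)) % 6).toNat + 1 := by omega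
      have h2 : (((2:Int) - i) % 6).toNat = 0 := by omega
      have h3 : (((3:Int) - i) % 6).toNat = (((3:Int) - (i+1)) % 6).toNat + 1 := by omega
      have h4 : (((4:Int) - i) % 6).toNat = (((4:Int) - (i+1)) % 6).toNat + 1 := by omega
      have h5 : (((5:Int) - i) % 6).toNat = (((5:Int) - (i+1)) % 6).toNat + 1 := by omega
      simp only [PySem.List.enumerate_cons, List.foldl_cons, pvStep, hm, h0, h1, h2, h3, h4, h5]
      norm_num
      rw [ih (i+1) (by omega)]
      simp [pvEvery6]
      all_goals congr 2
      all_goals omega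
    · -- i % 6 = 3
      have h0 : (((0:Int) - i) % 6).toNat = (((0:Int) - (i+1)) % 6).toNat + 1 := by omega
      have h1 : (((1:Int) - i) % 6).toNat = (((1:Int) - (i+1)) % 6).toNat + 1 := by omega
      have h2 : (((2:Int) - i) % 6).toNat = (((2:Int) - (i+1)) % 6).toNat + 1 := by omega
      have h3 : (((3:Int) - i) % 6).toNat = 0 := by omega
      have h4 : (((4:Int) - i) % 6).toNat = (((4:Int) - (i+1)) % 6).toNat + 1 := by omega
      have h5 : (((5:Int) - i) % 6).toNat = (((5:Int) - (i+1)) % 6).toNat + 1 := by omega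
      simp only [PySem.List.enumerate_cons, List.foldl_cons, pvStep, hm, h0, h1, h2, h3, h4, h5]
      norm_num
      rw [ih (i+1) (by omega)]
      simp [pvEvery6]
      all_goals congr 2
      all_goals omega
    · -- i % 6 = 4
      have h0 : (((0:Int) - i) % 6).toNat = (((0:Int) - (i+1)) % 6).toNat + 1 := by omega
      have h1 : (((1:Int) - i) % 6).toNat = (((1:Int) - (i+1)) % 6).toNat + 1 := by omega
      have h2 : (((2:Int) - i) % 6).toNat = (((2:Int) - (i+1)) % 6).toNat + 1 := by omega
      have h3 : (((3:Int) - i) % 6).toNat = (((3:Int) - (i+1)) % 6).toNat + 1 := by omega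
      have h4 : (((4:Int) - i) % 6).toNat = 0 := by omega
      have h5 : (((5:Int) - i) % 6).toNat = (((5:Int) - (i+1)) % 6).toNat + 1 := by omega
      simp only [PySem.List.enumerate_cons, List.foldl_cons, pvStep, hm, h0, h1, h2, h3, h4, h5]
      norm_num
      rw [ih (i+1) (by omega)]
      simp [pvEvery6]
      all_goals congr 2
      all_goals omega
    · -- i % 6 = 5
      have h0 : (((0:Int) - i) % 6).toNat = (((0:Int) - (i+1)) % 6).toNat + 1 := by omega
      have h1 : (((1:Int) - i) % 6).toNat = (((1:Int) - (i+1)) % 6).toNat + 1 := by omega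
      have h2 : (((2:Int) - i) % 6).toNat = (((2:Int) - (i+1)) % 6).toNat + 1 := by omega
      have h3 : (((3:Int) - i) % 6).toNat = (((3:Int) - (i+1)) % 6).toNat + 1 := by omega
      have h4 : (((4:Int) - i) % 6).toNat = (((4:Int) - (i+1)) % 6).toNat + 1 := by omega
      have h5 : (((5:Int) - i) % 6).toNat = 0 := by omega
      simp only [PySem.List.enumerate_cons, List.foldl_cons, pvStep, hm, h0, h1, h2, h3, h4, h5]
      norm_num
      rw [ih (i+1) (by omega)]
      simp [pvEvery6]
      all_goals congr 2
      all_goals omega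

-- ===== VERDICT (by name: the statement is the Claim_ definition above) =====
theorem string_decoder_spec : Claim_equal_string_decoder := by
  intro s _
  unfold Spec_string_decoder string_decoder string_decoder_alt
  rw [foldl_step_eq _ 0 (by omega)]
  simp
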